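-- pv_equiv track=rewrite | github.com/KiloMusician/ChatDev2 | ecosystem/SimulatedVerse/GameDev/engine/ml/procedural_gen.py | _calculate_chunk_resources
-- ===== SOURCE A (Python) =====
-- from typing import List, Dict, Any
--
-- def _calculate_chunk_resources(terrain: List[List[Dict]], biome: str) -> Dict[str, int]:
--     """Calculate resources available in chunk"""
--     resources = {"food": 0, "materials": 0, "energy": 0}
--
--     for row in terrain:
--         for tile in row:
--             if tile["type"] == "grass":
--                 resources["food"] += 1
--             elif tile["type"] in ["mountain", "hill"]:
--                 resources["materials"] += 1
--             elif tile["type"] == "water":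
--                 resources["energy"] += 1
--
--     return resources
-- ===== SOURCE B (Python) =====
-- def _calculate_chunk_resources(terrain, biome):
--     """Calculate resources available in chunk"""
--     types = [tile["type"] for row in terrain for tile in row]
--     return {
--         "food": types.count("grass"),
--         "materials": types.count("mountain") + types.count("hill"),
--         "energy": types.count("water"),
--     }
-- ===== Notes on version B (the rewrite author's own statement) =====
-- stated objective: simpler
-- what changed: Replaces A's single branch-dispatch pass mutating three counters with a flatten step followed by four independent list.count scans, one per relevant tile type, assembled into the result dict.
import Mathlib
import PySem

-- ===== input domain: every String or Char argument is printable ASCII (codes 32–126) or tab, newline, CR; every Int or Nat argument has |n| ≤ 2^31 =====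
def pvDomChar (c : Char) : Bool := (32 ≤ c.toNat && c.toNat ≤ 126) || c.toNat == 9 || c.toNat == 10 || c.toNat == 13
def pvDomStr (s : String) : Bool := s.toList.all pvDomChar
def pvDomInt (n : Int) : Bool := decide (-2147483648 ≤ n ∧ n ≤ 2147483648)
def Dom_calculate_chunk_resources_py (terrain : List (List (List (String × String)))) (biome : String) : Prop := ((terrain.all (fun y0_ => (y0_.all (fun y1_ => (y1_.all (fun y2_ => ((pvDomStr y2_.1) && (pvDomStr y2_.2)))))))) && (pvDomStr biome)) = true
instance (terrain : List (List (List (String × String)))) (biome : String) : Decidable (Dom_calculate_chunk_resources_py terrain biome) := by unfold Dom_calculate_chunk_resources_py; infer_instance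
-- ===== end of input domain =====

-- B replaces A's single branch-dispatch pass mutating three counters with a flatten
-- step followed by four independent list.count scans (objective: simpler).

-- ===== PORT A =====
-- tile["type"]: first-match lookup; the "" default is only reached outside Pre_ (Python raises KeyError there)
def pvTileType (tile : List (String × String)) : String := (PySem.Dict.mk tile).getD "type" ""

def calculate_chunk_resources_py (terrain : List (List (List (String × String)))) (biome : String) : List (String × Int) :=
  (terrain.foldl (fun resources row =>
    row.foldl (fun resources tile =>
      if pvTileType tile == "grass" then resources.modify "food" 0 (· + 1)
      else if pvTileType tile == "mountain" || pvTileType tile == "hill" then resources.modify "materials" 0 (· + 1)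
      else if pvTileType tile == "water" then resources.modify "energy" 0 (· + 1)
      else resources) resources)
    (PySem.Dict.ofList [("food", 0), ("materials", 0), ("energy", 0)])).items

-- ===== PORT B =====
def calculate_chunk_resources_py_alt (terrain : List (List (List (String × String)))) (biome : String) : List (String × Int) :=
  let types := terrain.flatMap (fun row => row.map (fun tile => pvTileType tile))
  [("food", PySem.List.count types "grass"),
   ("materials", PySem.List.count types "mountain" + PySem.List.count types "hill"),
   ("energy", PySem.List.count types "water")]

-- ===== PRECONDITION & SPEC =====
-- Pre_ excludes tiles lacking a "type" key: there both Pythons raise KeyError.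
def Pre_calculate_chunk_resources_py (terrain : List (List (List (String × String)))) (biome : String) : Prop :=
  ∀ row ∈ terrain, ∀ tile ∈ row, (PySem.Dict.mk tile).contains "type" = true
instance (terrain : List (List (List (String × String)))) (biome : String) : Decidable (Pre_calculate_chunk_resources_py terrain biome) := by unfold Pre_calculate_chunk_resources_py; infer_instance

def pvWitness_calculate_chunk_resources_py : (List (List (List (String × String)))) × String :=
  ([[[("type", "grass")], [("type", "water")]], [[("type", "hill")]]], "plains")

def Spec_calculate_chunk_resources_py (terrain : List (List (List (String × String)))) (biome : String) (out : List (String × Int)) : Prop := out = calculate_chunk_resources_py_alt terrain biome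
instance (terrain : List (List (List (String × String)))) (biome : String) (out : List (String × Int)) : Decidable (Spec_calculate_chunk_resources_py terrain biome out) := by unfold Spec_calculate_chunk_resources_py; infer_instance

-- ===== CLAIM (what is proved, stated in full; the proofs are below) =====
def Claim_equal_calculate_chunk_resources_py : Prop := ∀ (terrain : List (List (List (String × String)))) (biome : String), Dom_calculate_chunk_resources_py terrain biome → Pre_calculate_chunk_resources_py terrain biome → Spec_calculate_chunk_resources_py terrain biome (calculate_chunk_resources_py terrain biome)

-- ===== LEMMAS AND PROOFS =====

-- A's loop body, phrased on the tile's type string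
def pvStep (d : PySem.Dict String Int) (t : String) : PySem.Dict String Int :=
  if t == "grass" then d.modify "food" 0 (· + 1)
  else if t == "mountain" || t == "hill" then d.modify "materials" 0 (· + 1)
  else if t == "water" then d.modify "energy" 0 (· + 1)
  else d

lemma pvCountP_or (l : List String) :
    l.countP (fun t => t == "mountain" || t == "hill") = l.count "mountain" + l.count "hill" := by
  induction l with
  | nil => simp
  | cons x xs ih =>
    by_cases h1 : x = "mountain" <;> by_cases h2 : x = "hill" <;>
      simp_all <;> omega

lemma pvFold_invariant (l : List String) (f m e : Int) :
    l.foldl pvStep (PySem.Dict.mk [("food", f), ("materials", m), ("energy", e)]) =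
      PySem.Dict.mk [("food", f + l.count "grass"),
                     ("materials", m + l.countP (fun t => t == "mountain" || t == "hill")),
                     ("energy", e + l.count "water")] := by
  induction l generalizing f m e with
  | nil => simp
  | cons x xs ih =>
    simp only [List.foldl_cons, pvStep]
    by_cases hg : x = "grass"
    · have hm : PySem.Dict.modify (PySem.Dict.mk [("food", f), ("materials", m), ("energy", e)]) "food" 0 (· + 1) =
          PySem.Dict.mk [("food", f + 1), ("materials", m), ("energy", e)] := by
        simp [PySem.Dict.modify, PySem.Dict.insert, PySem.Dict.getD, PySem.Dict.get?, PySem.Dict.contains]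
      rw [if_pos (by simp [hg]), hm, ih]
      subst hg
      simp
      ring
    · by_cases hmh : x = "mountain" ∨ x = "hill"
      · have hm : PySem.Dict.modify (PySem.Dict.mk [("food", f), ("materials", m), ("energy", e)]) "materials" 0 (· + 1) =
            PySem.Dict.mk [("food", f), ("materials", m + 1), ("energy", e)] := by
          simp [PySem.Dict.modify, PySem.Dict.insert, PySem.Dict.getD, PySem.Dict.get?, PySem.Dict.contains]
        rw [if_neg (by simp [hg]), if_pos (by rcases hmh with h | h <;> simp [h]), hm, ih]
        have hx1 : (x == "grass") = false := by simp [hg]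
        have hx2 : (x == "mountain" || x == "hill") = true := by rcases hmh with h | h <;> simp [h]
        have hx3 : (x == "water") = false := by rcases hmh with h | h <;> subst h <;> decide
        simp [List.count_cons, hx1, hx2, hx3]
        ring
      · have hm1 : x ≠ "mountain" := fun h => hmh (Or.inl h)
        have hm2 : x ≠ "hill" := fun h => hmh (Or.inr h)
        by_cases hw : x = "water"
        · have hm : PySem.Dict.modify (PySem.Dict.mk [("food", f), ("materials", m), ("energy", e)]) "energy" 0 (· + 1) =
              PySem.Dict.mk [("food", f), ("materials", m), ("energy", e + 1)] := by
            simp [PySem.Dict.modify, PySem.Dict.insert, PySem.Dict.getD, PySem.Dict.get?, PySem.Dict.contains]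
          rw [if_neg (by simp [hg]), if_neg (by simp [hm1, hm2]), if_pos (by simp [hw]), hm, ih]
          subst hw
          simp
          ring
        · rw [if_neg (by simp [hg]), if_neg (by simp [hm1, hm2]), if_neg (by simp [hw]), ih]
          simp [hg, hm1, hm2, hw]

lemma pvNested_foldl (terrain : List (List (List (String × String)))) (init : PySem.Dict String Int) :
    terrain.foldl (fun resources row =>
      row.foldl (fun resources tile =>
        if pvTileType tile == "grass" then resources.modify "food" 0 (· + 1)
        else if pvTileType tile == "mountain" || pvTileType tile == "hill" then resources.modify "materials" 0 (· + 1)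
        else if pvTileType tile == "water" then resources.modify "energy" 0 (· + 1)
        else resources) resources) init
    = (terrain.flatMap (fun row => row.map (fun tile => pvTileType tile))).foldl pvStep init := by
  induction terrain generalizing init with
  | nil => simp
  | cons r rs ih =>
    simp only [List.foldl_cons, List.flatMap_cons, List.foldl_append, ih, List.foldl_map]
    rfl

-- ===== VERDICT (by name: the statement is the Claim_ definition above) =====
theorem calculate_chunk_resources_py_spec : Claim_equal_calculate_chunk_resources_py := by
  intro terrain biome _ _
  unfold Spec_calculate_chunk_resources_py
  unfold calculate_chunk_resources_py calculate_chunk_resources_py_alt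
  have hinit : PySem.Dict.ofList ([("food", (0:Int)), ("materials", 0), ("energy", 0)]) =
      PySem.Dict.mk [("food", 0), ("materials", 0), ("energy", 0)] := by decide
  rw [hinit, pvNested_foldl, pvFold_invariant]
  simp [PySem.List.count, pvCountP_or]
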